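-- pv_equiv track=rewrite | github.com/Siddhesh25082001/Infytq-Preparation | Assignment-7/3.py | check_perfectno_from_list
-- ===== SOURCE A (Python) =====
-- def check_perfect_number(number):
--
--     #start writing your code here
--     factors = []
--     for i in range(1, (number + 1)):
--         if(number % i == 0):
--             factors.append(i)
--
--     s = sum(factors[0:-1])
--     if s == number: return True
--     else: return False
--
-- def check_perfectno_from_list(no_list):
--
--     #start writing your code here
--     l = []
--     for num in no_list:
--         if num > 5:
--             f = check_perfect_number(num)
--             if f == True: l.append(num)
--         else:
--             continue
--
--     return l
-- ===== SOURCE B (Python) =====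
-- def _is_perfect(num):
--     s = 1
--     i = 2
--     while i * i <= num:
--         if num % i == 0:
--             s += i
--             j = num // i
--             if j != i:
--                 s += j
--         i += 1
--     return s == num
--
-- def check_perfectno_from_list(no_list):
--     return [num for num in no_list if num > 5 and _is_perfect(num)]
-- ===== Notes on version B (the rewrite author's own statement) =====
-- stated objective: alternative
-- what changed: B tests perfectness by summing divisor pairs (i, num//i) with trial division only while i*i <= num, instead of A's scan of every i in 1..num building a divisor list and summing a slice of it: O(sqrt(n)) instead of O(n) divisor-candidate work per element.
import Mathlib
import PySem

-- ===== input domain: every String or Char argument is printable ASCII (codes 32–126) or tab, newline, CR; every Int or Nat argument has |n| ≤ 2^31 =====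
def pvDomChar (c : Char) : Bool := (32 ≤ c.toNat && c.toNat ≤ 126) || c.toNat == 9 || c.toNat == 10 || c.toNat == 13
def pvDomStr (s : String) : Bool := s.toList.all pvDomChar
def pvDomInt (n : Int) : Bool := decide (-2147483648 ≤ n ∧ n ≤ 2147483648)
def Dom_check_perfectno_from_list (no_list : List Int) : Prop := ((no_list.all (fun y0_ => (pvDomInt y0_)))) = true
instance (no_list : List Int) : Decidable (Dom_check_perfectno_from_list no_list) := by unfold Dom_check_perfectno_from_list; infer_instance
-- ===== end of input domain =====

-- B tests perfectness by pairing divisors with trial division only while i*i <= num, instead of A's full scan of 1..num: a different algorithm (O(sqrt(n)) instead of O(n) divisor candidates per element).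

-- ===== PORT A =====
def check_perfect_number (number : Int) : Bool :=
  -- factors = []; for i in range(1, number+1): if number % i == 0: factors.append(i)
  let factors : List Int := (PySem.List.pyRange 1 (number + 1) 1).foldl
      (fun acc i => if PySem.Int.mod number i == 0 then acc ++ [i] else acc) []
  -- s = sum(factors[0:-1])
  let s : Int := (PySem.List.slice factors (some 0) (some (-1))).sum
  if s == number then true else false

def check_perfectno_from_list (no_list : List Int) : List Int :=
  no_list.foldl (fun l num =>
    if num > 5 then
      let f := check_perfect_number num
      if f == true then l ++ [num] else l
    else l) []

-- ===== PORT B =====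
-- while i * i <= num: if num % i == 0: s += i; j = num // i; if j != i: s += j; i += 1
def pvPerfLoop (num : Int) (s : Int) (i : Int) : Int :=
  if _h : i * i ≤ num then
    pvPerfLoop num
      (if PySem.Int.mod num i == 0 then
        let j := PySem.Int.floordiv num i
        let s1 := s + i
        if j ≠ i then s1 + j else s1
      else s) (i + 1)
  else s
termination_by (num + 1 - i).toNat
decreasing_by
  have hi : i ≤ num := by nlinarith [sq_nonneg i]
  omega

def pvIsPerfect (num : Int) : Bool := pvPerfLoop num 1 2 == num

def check_perfectno_from_list_alt (no_list : List Int) : List Int :=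
  no_list.filter (fun num => decide (num > 5) && pvIsPerfect num)

-- ===== PRECONDITION & SPEC =====
def Spec_check_perfectno_from_list (no_list : List Int) (out : List Int) : Prop := out = check_perfectno_from_list_alt no_list
instance (no_list : List Int) (out : List Int) : Decidable (Spec_check_perfectno_from_list no_list out) := by unfold Spec_check_perfectno_from_list; infer_instance

-- ===== CLAIM (what is proved, stated in full; the proofs are below) =====
def Claim_equal_check_perfectno_from_list : Prop := ∀ (no_list : List Int), Dom_check_perfectno_from_list no_list → Spec_check_perfectno_from_list no_list (check_perfectno_from_list no_list)

-- ===== LEMMAS AND PROOFS =====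

-- Nat-level mirror of B's trial-division loop (proof tool only).
def pvPerfLoopN (n : ℕ) (i : ℕ) : ℕ :=
  if _h : i * i ≤ n then
    (if n % i = 0 then i + (if n / i ≠ i then n / i else 0) else 0) + pvPerfLoopN n (i + 1)
  else 0
termination_by n + 1 - i
decreasing_by
  rcases Nat.eq_zero_or_pos i with h0 | h0
  · omega
  · have := Nat.le_mul_of_pos_left i h0
    omega

-- Int loop = accumulator + Nat loop
lemma pvPerfLoop_eq_natLoop (n : ℕ) : ∀ k i, 1 ≤ i → n + 1 ≤ i + k →
    ∀ s : Int, pvPerfLoop (n : Int) s (i : Int) = s + (pvPerfLoopN n i : Int) := by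
  intro k
  induction k with
  | zero =>
    intro i hi hik s
    have hii : ¬ (i * i ≤ n) := by
      have := Nat.le_mul_of_pos_left i (by omega : 0 < i)
      omega
    rw [pvPerfLoop, pvPerfLoopN]
    have hii' : ¬ ((i : Int) * (i : Int) ≤ (n : Int)) := by exact_mod_cast hii
    simp [hii, hii']
  | succ k ih =>
    intro i hi hik s
    rw [pvPerfLoop, pvPerfLoopN]
    by_cases hc : i * i ≤ n
    · have hc' : ((i : Int) * (i : Int) ≤ (n : Int)) := by exact_mod_cast hc
      have hrec := ih (i + 1) (by omega) (by omega)
      have hcast : ((i : Int) + 1) = (((i + 1 : ℕ)) : Int) := by push_cast; ring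
      rw [dif_pos hc', dif_pos hc, hcast, hrec]
      by_cases hm : n % i = 0
      · have hm' : PySem.Int.mod (n : Int) (i : Int) == 0 := by
          simp [PySem.Int.mod_natCast, hm]
        have hdiv : PySem.Int.floordiv (n : Int) (i : Int) = ((n / i : ℕ) : Int) :=
          PySem.Int.floordiv_natCast n i
        rw [if_pos hm', if_pos hm]
        simp only [hdiv]
        by_cases hj : n / i = i
        · rw [if_neg (by simp [hj] : ¬ (((n / i : ℕ) : Int) ≠ (i : Int))), if_neg (by simp [hj])]
          push_cast; ring
        · have hj' : ((n / i : ℕ) : Int) ≠ (i : Int) := by exact_mod_cast hj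
          rw [if_pos hj', if_pos hj]
          push_cast; ring
      · have hm' : ¬ ((PySem.Int.mod (n : Int) (i : Int) == 0) = true) := by
          rw [PySem.Int.mod_natCast]
          simp only [beq_iff_eq, Nat.cast_eq_zero]
          exact hm
        rw [if_neg hm', if_neg hm]
        push_cast
        ring
    · have hc' : ¬ ((i : Int) * (i : Int) ≤ (n : Int)) := by exact_mod_cast hc
      rw [dif_neg hc', dif_neg hc]
      push_cast
      ring

-- trial-division loop from i sums the paired contributions of all divisors d ≥ i with d*d ≤ n
lemma pvPerfLoopN_eq_sum (n : ℕ) (hn : 1 ≤ n) : ∀ k i, 1 ≤ i → n + 1 ≤ i + k →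
    pvPerfLoopN n i =
      ∑ d ∈ n.divisors.filter (fun d => i ≤ d ∧ d * d ≤ n), (d + if d * d < n then n / d else 0) := by
  intro k
  induction k with
  | zero =>
    intro i hi hik
    have hii : ¬ (i * i ≤ n) := by
      have := Nat.le_mul_of_pos_left i (by omega : 0 < i)
      omega
    rw [pvPerfLoopN, dif_neg hii]
    have hemp : n.divisors.filter (fun d => i ≤ d ∧ d * d ≤ n) = ∅ := by
      apply Finset.filter_eq_empty_iff.mpr
      rintro d _ ⟨h1, h2⟩
      exact hii (le_trans (Nat.mul_le_mul h1 h1) h2)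
    rw [hemp, Finset.sum_empty]
  | succ k ih =>
    intro i hi hik
    rw [pvPerfLoopN]
    by_cases hc : i * i ≤ n
    · rw [dif_pos hc, ih (i + 1) (by omega) (by omega)]
      by_cases hm : n % i = 0
      · have hdvd : i ∣ n := Nat.dvd_of_mod_eq_zero hm
        have hset : n.divisors.filter (fun d => i ≤ d ∧ d * d ≤ n)
            = insert i (n.divisors.filter (fun d => i + 1 ≤ d ∧ d * d ≤ n)) := by
          ext d
          simp only [Finset.mem_filter, Finset.mem_insert, Nat.mem_divisors]
          constructor
          · rintro ⟨⟨hd, hn0⟩, h1, h2⟩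
            rcases eq_or_lt_of_le h1 with he | hlt
            · exact Or.inl he.symm
            · exact Or.inr ⟨⟨hd, hn0⟩, by omega, h2⟩
          · rintro (rfl | ⟨⟨hd, hn0⟩, h1, h2⟩)
            · exact ⟨⟨hdvd, by omega⟩, le_refl _, hc⟩
            · exact ⟨⟨hd, hn0⟩, by omega, h2⟩
        rw [hset, Finset.sum_insert (by intro hmem; simp only [Finset.mem_filter] at hmem; omega)]
        rw [if_pos hm]
        congr 1
        by_cases hs : i * i = n
        · have hdi : n / i = i := by
            rw [← hs]; exact Nat.mul_div_cancel_left i (by omega)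
          rw [if_neg (by omega : ¬ (n / i ≠ i)), if_neg (by omega : ¬ (i * i < n))]
        · have hlt : i * i < n := lt_of_le_of_ne hc hs
          have hne : n / i ≠ i := by
            intro he
            have hmul : n / i * i = n := Nat.div_mul_cancel hdvd
            rw [he] at hmul
            exact hs (by omega)
          rw [if_pos hne, if_pos hlt]
      · have hset : n.divisors.filter (fun d => i ≤ d ∧ d * d ≤ n)
            = n.divisors.filter (fun d => i + 1 ≤ d ∧ d * d ≤ n) := by
          ext d
          simp only [Finset.mem_filter, Nat.mem_divisors]
          constructor
          · rintro ⟨⟨hd, hn0⟩, h1, h2⟩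
            refine ⟨⟨hd, hn0⟩, ?_, h2⟩
            rcases eq_or_lt_of_le h1 with rfl | hlt
            · exact absurd (Nat.eq_zero_of_dvd_of_lt hd) (by omega)
            · omega
          · rintro ⟨h, h1, h2⟩
            exact ⟨h, by omega, h2⟩
        rw [if_neg hm, hset, Nat.zero_add]
    · rw [dif_neg hc]
      have hemp : n.divisors.filter (fun d => i ≤ d ∧ d * d ≤ n) = ∅ := by
        apply Finset.filter_eq_empty_iff.mpr
        rintro d _ ⟨h1, h2⟩
        exact hc (le_trans (Nat.mul_le_mul h1 h1) h2)
      rw [hemp, Finset.sum_empty]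

-- σ(n) split along the sqrt: pair each large divisor d with n/d
lemma pvSigma_split (n : ℕ) (hn : 2 ≤ n) :
    ∑ d ∈ n.divisors, d =
      (1 + n) + ∑ d ∈ n.divisors.filter (fun d => 2 ≤ d ∧ d * d ≤ n), (d + if d * d < n then n / d else 0) := by
  have hn0 : n ≠ 0 := by omega
  -- split σ at the square root
  have hsplit := Finset.sum_filter_add_sum_filter_not n.divisors (fun d => d * d ≤ n) (fun d => d)
  -- large divisors ↔ small strict divisors via d ↦ n / d
  have hbij : ∑ d ∈ n.divisors.filter (fun d => ¬ d * d ≤ n), d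
      = ∑ e ∈ n.divisors.filter (fun e => e * e < n), n / e := by
    apply Finset.sum_nbij' (i := fun d => n / d) (j := fun e => n / e)
    · rintro d hd
      simp only [Finset.mem_filter, Nat.mem_divisors] at hd ⊢
      obtain ⟨⟨hdvd, _⟩, hbig⟩ := hd
      have hq : n / d * d = n := Nat.div_mul_cancel hdvd
      have hlt : n / d < d := by nlinarith
      exact ⟨⟨Nat.div_dvd_of_dvd hdvd, hn0⟩, by nlinarith⟩
    · rintro e he
      simp only [Finset.mem_filter, Nat.mem_divisors] at he ⊢
      obtain ⟨⟨hdvd, _⟩, hsm⟩ := he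
      have he1 : 1 ≤ e := Nat.pos_of_dvd_of_pos hdvd (by omega)
      have hq : e * (n / e) = n := Nat.mul_div_cancel' hdvd
      have hlt : e < n / e := by nlinarith
      exact ⟨⟨Nat.div_dvd_of_dvd hdvd, hn0⟩, by nlinarith⟩
    · rintro d hd
      simp only [Finset.mem_filter, Nat.mem_divisors] at hd
      exact Nat.div_div_self hd.1.1 hn0
    · rintro e he
      simp only [Finset.mem_filter, Nat.mem_divisors] at he
      exact Nat.div_div_self he.1.1 hn0
    · rintro d hd
      simp only [Finset.mem_filter, Nat.mem_divisors] at hd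
      exact (Nat.div_div_self hd.1.1 hn0).symm
  -- fold the strict sum into an ite over the small divisors
  have hite : ∑ d ∈ n.divisors.filter (fun d => d * d ≤ n), (if d * d < n then n / d else 0)
      = ∑ e ∈ n.divisors.filter (fun e => e * e < n), n / e := by
    rw [Finset.sum_filter, Finset.sum_filter]
    apply Finset.sum_congr rfl
    intro d _
    split_ifs <;> first | rfl | omega
  have hS : n.divisors.filter (fun d => d * d ≤ n)
      = insert 1 (n.divisors.filter (fun d => 2 ≤ d ∧ d * d ≤ n)) := by
    ext d
    simp only [Finset.mem_filter, Finset.mem_insert, Nat.mem_divisors]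
    constructor
    · rintro ⟨⟨hd, h0⟩, h2⟩
      have : 1 ≤ d := Nat.pos_of_dvd_of_pos hd (by omega)
      rcases Nat.eq_or_lt_of_le this with he | hlt
      · exact Or.inl he.symm
      · exact Or.inr ⟨⟨hd, h0⟩, by omega, h2⟩
    · rintro (rfl | ⟨⟨hd, h0⟩, _, h2⟩)
      · exact ⟨⟨one_dvd n, hn0⟩, by omega⟩
      · exact ⟨⟨hd, h0⟩, h2⟩
  calc ∑ d ∈ n.divisors, d
      = ∑ d ∈ n.divisors.filter (fun d => d * d ≤ n), d
        + ∑ d ∈ n.divisors.filter (fun d => ¬ d * d ≤ n), d := hsplit.symm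
    _ = ∑ d ∈ n.divisors.filter (fun d => d * d ≤ n), d
        + ∑ d ∈ n.divisors.filter (fun d => d * d ≤ n), (if d * d < n then n / d else 0) := by
          rw [hbij, hite]
    _ = ∑ d ∈ n.divisors.filter (fun d => d * d ≤ n), (d + if d * d < n then n / d else 0) := by
          rw [← Finset.sum_add_distrib]
    _ = (1 + n) + ∑ d ∈ n.divisors.filter (fun d => 2 ≤ d ∧ d * d ≤ n), (d + if d * d < n then n / d else 0) := by
          rw [hS, Finset.sum_insert (by intro hmem; simp only [Finset.mem_filter] at hmem; omega)]
          rw [if_pos (by omega : 1 * 1 < n)]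
          simp [Nat.div_one]

-- B's inner loop computes the proper-divisor sum
lemma pvLoop_eq_proper (n : ℕ) (hn : 2 ≤ n) :
    1 + pvPerfLoopN n 2 = ∑ d ∈ n.properDivisors, d := by
  have h1 := pvPerfLoopN_eq_sum n (by omega) (n - 1) 2 (by omega) (by omega)
  have h2 := pvSigma_split n hn
  have h3 : ∑ d ∈ n.properDivisors, d + n = ∑ d ∈ n.divisors, d :=
    Nat.sum_divisors_eq_sum_properDivisors_add_self.symm
  omega

-- list-of-divisors sum as a Finset sum, by induction on the scan bound
lemma pvListSum (n : ℕ) : ∀ m, (((List.range m).filter (fun k => n % (k+1) = 0)).map (fun k => k+1)).sum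
    = ∑ d ∈ (Finset.Ico 1 (m+1)).filter (fun d => n % d = 0), d := by
  intro m
  induction m with
  | zero => simp
  | succ m ih =>
    rw [List.range_succ, List.filter_append, List.map_append, List.sum_append, ih]
    by_cases hm : n % (m+1) = 0
    · have hset : (Finset.Ico 1 (m+1+1)).filter (fun d => n % d = 0)
          = insert (m+1) ((Finset.Ico 1 (m+1)).filter (fun d => n % d = 0)) := by
        ext d
        simp only [Finset.mem_filter, Finset.mem_insert, Finset.mem_Ico]
        constructor
        · rintro ⟨⟨h1, h2⟩, h3⟩
          rcases Nat.lt_or_ge d (m+1) with h | h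
          · exact Or.inr ⟨⟨h1, h⟩, h3⟩
          · exact Or.inl (by omega)
        · rintro (rfl | ⟨⟨h1, h2⟩, h3⟩)
          · exact ⟨⟨by omega, by omega⟩, hm⟩
          · exact ⟨⟨h1, by omega⟩, h3⟩
      rw [hset, Finset.sum_insert (by intro hmem; simp only [Finset.mem_filter, Finset.mem_Ico] at hmem; omega)]
      simp [hm]
      omega
    · have hset : (Finset.Ico 1 (m+1+1)).filter (fun d => n % d = 0)
          = (Finset.Ico 1 (m+1)).filter (fun d => n % d = 0) := by
        ext d
        simp only [Finset.mem_filter, Finset.mem_Ico]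
        constructor
        · rintro ⟨⟨h1, h2⟩, h3⟩
          refine ⟨⟨h1, ?_⟩, h3⟩
          rcases Nat.lt_or_ge d (m+1) with h | h
          · exact h
          · have hde : d = m+1 := by omega
            exact absurd (hde ▸ h3) hm
        · rintro ⟨⟨h1, h2⟩, h3⟩
          exact ⟨⟨h1, by omega⟩, h3⟩
      rw [hset]
      simp [hm]
-- the proper divisors are exactly the scan range 1..n-1
lemma pvIcoFilter (n : ℕ) (hn : 1 ≤ n) :
    (Finset.Ico 1 (n-1+1)).filter (fun d => n % d = 0) = n.properDivisors := by
  ext d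
  simp only [Finset.mem_filter, Finset.mem_Ico, Nat.mem_properDivisors]
  constructor
  · rintro ⟨⟨h1, h2⟩, h3⟩
    exact ⟨Nat.dvd_of_mod_eq_zero h3, by omega⟩
  · rintro ⟨hdvd, hlt⟩
    have h1 : 1 ≤ d := Nat.pos_of_dvd_of_pos hdvd (by omega)
    exact ⟨⟨h1, by omega⟩, Nat.mod_eq_zero_of_dvd hdvd⟩

-- filter-after-map = map-after-filter for pointwise-matching functions (shape of A's factors scan)
lemma pvMapFilter {l : List ℕ} {p : Int → Bool} {f : ℕ → Int} {q : ℕ → Bool} {g : ℕ → Int}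
    (hpq : ∀ k ∈ l, p (f k) = q k) (hfg : ∀ k ∈ l, f k = g k) :
    (l.map f).filter p = (l.filter q).map g := by
  induction l with
  | nil => rfl
  | cons a l ih =>
    have h1 := hpq a (by simp)
    have h2 := hfg a (by simp)
    have ih' := ih (fun k hk => hpq k (by simp [hk])) (fun k hk => hfg k (by simp [hk]))
    have h12 : p (g a) = q a := h2 ▸ h1
    simp only [List.map_cons, List.filter_cons, h2, h12, ih']
    cases hq : q a <;> simp

-- A's factors computation: sum of dropLast = proper-divisor sum
lemma pvFactors_eq_proper (n : ℕ) (hn : 1 ≤ n) :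
    (PySem.List.slice
      ((PySem.List.pyRange 1 ((n : Int) + 1) 1).foldl
        (fun acc i => if PySem.Int.mod (n : Int) i == 0 then acc ++ [i] else acc) [])
      (some 0) (some (-1))).sum = ((∑ d ∈ n.properDivisors, d : ℕ) : Int) := by
  obtain ⟨m, rfl⟩ : ∃ m, n = m + 1 := ⟨n - 1, by omega⟩
  have hF : (PySem.List.pyRange 1 (((m+1 : ℕ) : Int) + 1) 1).foldl
        (fun acc i => if PySem.Int.mod ((m+1 : ℕ) : Int) i == 0 then acc ++ [i] else acc) []
      = (((List.range (m+1)).filter (fun k => (m+1) % (k+1) = 0)).map (fun k => (k+1 : ℕ))).map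
          (fun j : ℕ => (j : Int)) := by
    rw [PySem.List.foldl_append_if_eq_filter, PySem.List.pyRange_one]
    have h1 : (((m+1 : ℕ) : Int) + 1 - 1).toNat = m + 1 := by omega
    rw [h1, List.nil_append, List.map_map]
    apply pvMapFilter
    · intro k _
      have h2 : (1 + (k : Int)) = ((k + 1 : ℕ) : Int) := by push_cast; ring
      rw [h2, PySem.Int.mod_natCast]
      by_cases hmk : (m+1) % (k+1) = 0
      · simp [hmk]
      · rw [decide_eq_false hmk]
        simp only [beq_eq_false_iff_ne, ne_eq, Nat.cast_eq_zero]
        exact hmk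
    · intro k _
      simp only [Function.comp_apply]
      push_cast
      ring
  rw [hF, PySem.List.slice_zero_start, PySem.List.slice_to_neg_one]
  rw [← List.map_dropLast, ← List.map_dropLast]
  have hX : ((List.range (m+1)).filter (fun k => (m+1) % (k+1) = 0)).dropLast
      = (List.range m).filter (fun k => (m+1) % (k+1) = 0) := by
    rw [List.range_succ, List.filter_append]
    have hm : ((m+1) % (m+1) = 0) := Nat.mod_self _
    have h3 : List.filter (fun k => decide ((m+1) % (k+1) = 0)) [m] = [m] := by simp [hm]
    rw [h3, List.dropLast_concat]
  rw [hX, ← Nat.cast_list_sum, pvListSum (m+1) m]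
  have h4 := pvIcoFilter (m+1) (by omega)
  simp only [Nat.add_sub_cancel] at h4
  rw [h4]

-- per-element predicate equality above 5
lemma pvPred_eq (num : Int) (h : num > 5) : check_perfect_number num = pvIsPerfect num := by
  obtain ⟨n, rfl⟩ : ∃ n : ℕ, num = (n : Int) := ⟨num.toNat, by omega⟩
  have hn : 6 ≤ n := by omega
  have hA := pvFactors_eq_proper n (by omega)
  have hB := pvPerfLoop_eq_natLoop n (n - 1) 2 (by omega) (by omega) 1
  have h2 : (((2:ℕ)) : Int) = (2 : Int) := by norm_num
  rw [h2] at hB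
  have hP : (1 : Int) + ((pvPerfLoopN n 2 : ℕ) : Int) = ((∑ d ∈ n.properDivisors, d : ℕ) : Int) := by
    exact_mod_cast pvLoop_eq_proper n (by omega)
  unfold check_perfect_number pvIsPerfect
  simp only [hA, hB, hP]
  cases hres : (((∑ d ∈ n.properDivisors, d : ℕ) : Int) == (n : Int)) <;> simp

theorem check_perfectno_from_list_spec : Claim_equal_check_perfectno_from_list := by
  intro no_list _
  unfold Spec_check_perfectno_from_list check_perfectno_from_list check_perfectno_from_list_alt
  simp only [beq_true]
  calc List.foldl (fun (acc : List Int) num =>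
          if num > 5 then if check_perfect_number num = true then acc ++ [num] else acc else acc) [] no_list
      = List.foldl (fun acc num =>
          if decide (num > 5) && check_perfect_number num then acc ++ [num] else acc) [] no_list :=
        PySem.List.foldl_congr_mem _ _ _ _ (by intro acc x _; by_cases h5 : x > 5 <;> simp [h5])
    _ = List.filter (fun num => decide (num > 5) && check_perfect_number num) no_list := by
        rw [PySem.List.foldl_append_if_eq_filter, List.nil_append]
    _ = List.filter (fun num => decide (num > 5) && pvIsPerfect num) no_list := by
        apply List.filter_congr
        intro x _
        by_cases h5 : x > 5
        · rw [pvPred_eq x h5]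
        · simp [h5]
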